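-- pv_equiv track=rewrite | github.com/guillainbisimwa/competitive-programming | D_A_Step_Back.py | score_high
-- ===== SOURCE A (Python) =====
-- def score_high(m):
--     results = []
--     for t in m:
--         n, k, z, arr = t
--         score_high = 0
--
--         for left_moves in range(z + 1):
--             remaining_moves = k - 2 * left_moves
--             if remaining_moves < 0:
--                 continue
--
--             current_score = sum(arr[:remaining_moves + 1])
--
--             max_pair = 0
--             for i in range(remaining_moves):
--                 max_pair = max(max_pair, arr[i] + arr[i + 1])
--
--             current_score += max_pair * left_moves
--
--             score_high = max(score_high, current_score)
--
--         results.append(score_high)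
--
--     return results
-- ===== SOURCE B (Python) =====
-- def score_high(m):
--     results = []
--     for n, k, z, arr in m:
--         best = 0
--         if z >= 0 and k >= 0 and arr:
--             head = arr[:k + 1]
--             pre = [0]
--             s = 0
--             for x in head:
--                 s += x
--                 pre.append(s)
--             pm = [0]
--             p = 0
--             for i in range(1, k + 1):
--                 p = max(p, arr[i - 1] + arr[i])
--                 pm.append(p)
--             L = min(z, k // 2)
--             for lm in range(L + 1):
--                 r = k - 2 * lm
--                 best = max(best, pre[r + 1] + pm[r] * lm)
--         results.append(best)
--     return results
-- ===== Notes on version B (the rewrite author's own statement) =====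
-- stated objective: faster
-- what changed: Instead of recomputing sum(arr[:r+1]) and rescanning all adjacent pairs for every left-move count, B builds the prefix-sum array and the running max-adjacent-pair array once per test and answers each left-move count with two O(1) lookups.
import Mathlib
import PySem

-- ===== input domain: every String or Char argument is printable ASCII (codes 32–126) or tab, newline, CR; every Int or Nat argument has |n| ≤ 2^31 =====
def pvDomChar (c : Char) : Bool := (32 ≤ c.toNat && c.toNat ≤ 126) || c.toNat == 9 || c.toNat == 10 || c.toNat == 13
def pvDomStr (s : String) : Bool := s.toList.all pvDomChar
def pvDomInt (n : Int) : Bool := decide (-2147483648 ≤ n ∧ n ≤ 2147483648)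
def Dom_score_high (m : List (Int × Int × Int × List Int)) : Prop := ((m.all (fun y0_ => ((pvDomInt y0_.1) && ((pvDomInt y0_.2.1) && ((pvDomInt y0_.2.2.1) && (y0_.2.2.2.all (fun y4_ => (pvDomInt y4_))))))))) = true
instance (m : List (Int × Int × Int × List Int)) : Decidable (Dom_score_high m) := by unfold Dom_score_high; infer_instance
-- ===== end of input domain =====

-- B replaces A's rescan (prefix sum + adjacent-pair max) per left-move count by prefix-sum and
-- running-pair-max arrays built once, with one O(1) lookup per left-move count (objective: faster).

-- ===== PORT A =====
-- per-test body of A: the loop over left_moves, each iteration redoing sum(arr[:r+1]) and the pair scan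
-- (arr[i] is ported as pyGetD with default 0; exact under Pre_, which excludes the IndexError inputs)
def pvScoreA (k z : Int) (arr : List Int) : Int :=
  (PySem.List.pyRange 0 (z + 1) 1).foldl (fun sh lm =>
    if k - 2 * lm < 0 then sh
    else max sh ((PySem.List.slice arr none (some (k - 2 * lm + 1))).sum +
      (PySem.List.pyRange 0 (k - 2 * lm) 1).foldl (fun mpv i =>
        max mpv (PySem.List.pyGetD arr i 0 + PySem.List.pyGetD arr (i + 1) 0)) 0 * lm)) 0

def score_high (m : List (Int × Int × Int × List Int)) : List Int :=
  m.foldl (fun results t => results ++ [pvScoreA t.2.1 t.2.2.1 t.2.2.2]) []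

-- ===== PORT B =====
-- per-test body of B: build prefix sums `pre` and running max adjacent pair `pm` once
-- (each fold state is (list built so far, running value)), then one lookup per left_moves
def pvScoreB (k z : Int) (arr : List Int) : Int :=
  if z ≥ 0 ∧ k ≥ 0 ∧ arr ≠ [] then
    let pre := ((PySem.List.slice arr none (some (k + 1))).foldl
        (fun ps x => (ps.1 ++ [ps.2 + x], ps.2 + x)) ([(0 : Int)], (0 : Int))).1
    let pm := ((PySem.List.pyRange 1 (k + 1) 1).foldl (fun ps i =>
        (ps.1 ++ [max ps.2 (PySem.List.pyGetD arr (i - 1) 0 + PySem.List.pyGetD arr i 0)],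
         max ps.2 (PySem.List.pyGetD arr (i - 1) 0 + PySem.List.pyGetD arr i 0))) ([(0 : Int)], (0 : Int))).1
    (PySem.List.pyRange 0 (min z (PySem.Int.floordiv k 2) + 1) 1).foldl (fun best lm =>
      max best (PySem.List.pyGetD pre (k - 2 * lm + 1) 0 + PySem.List.pyGetD pm (k - 2 * lm) 0 * lm)) 0
  else 0

def score_high_alt (m : List (Int × Int × Int × List Int)) : List Int :=
  m.foldl (fun results t => results ++ [pvScoreB t.2.1 t.2.2.1 t.2.2.2]) []

-- ===== PRECONDITION & SPEC =====
-- Pre_ holds exactly when A raises no IndexError: each test needs z < 0, or k ≤ 0,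
-- or k < len(arr) (otherwise the inner pair loop reads arr out of range and A raises).
def Pre_score_high (m : List (Int × Int × Int × List Int)) : Prop :=
  ∀ t ∈ m, t.2.2.1 < 0 ∨ t.2.1 ≤ 0 ∨ t.2.1 < (t.2.2.2.length : Int)
instance (m : List (Int × Int × Int × List Int)) : Decidable (Pre_score_high m) := by
  unfold Pre_score_high; infer_instance

def pvWitness_score_high : (List (Int × Int × Int × List Int)) :=
  [(5, 3, 2, [1, -2, 3, 4, -1])]

def Spec_score_high (m : List (Int × Int × Int × List Int)) (out : List Int) : Prop := out = score_high_alt m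
instance (m : List (Int × Int × Int × List Int)) (out : List Int) : Decidable (Spec_score_high m out) := by unfold Spec_score_high; infer_instance

-- ===== CLAIM (what is proved, stated in full; the proofs are below) =====
def Claim_equal_score_high : Prop := ∀ (m : List (Int × Int × Int × List Int)), Dom_score_high m → Pre_score_high m → Spec_score_high m (score_high m)

-- ===== LEMMAS AND PROOFS =====

-- a fold that keeps its accumulator is the identity
theorem pv_foldl_id (l : List Int) (a : Int) : l.foldl (fun s _ => s) a = a := by
  induction l generalizing a with
  | nil => rfl
  | cons x xs ih => exact ih a

-- A's outer loop over a range where every left-move count is skipped keeps the accumulator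
theorem pv_skipA (k a b init : Int) (arr : List Int)
    (h : ∀ lm, a ≤ lm → lm < b → k - 2 * lm < 0) :
    (PySem.List.pyRange a b 1).foldl (fun sh lm =>
      if k - 2 * lm < 0 then sh
      else max sh ((PySem.List.slice arr none (some (k - 2 * lm + 1))).sum +
        (PySem.List.pyRange 0 (k - 2 * lm) 1).foldl (fun mpv i =>
          max mpv (PySem.List.pyGetD arr i 0 + PySem.List.pyGetD arr (i + 1) 0)) 0 * lm)) init
      = init := by
  refine Eq.trans (PySem.List.foldl_congr_mem _ _ (fun (s : Int) (_ : Int) => s) _ ?_) (pv_foldl_id _ _)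
  intro acc lm hm
  have hb := PySem.List.mem_pyRange_one.mp hm
  simp only [if_pos (h lm hb.1 hb.2)]

-- the list of running values of an accumulator (pre and pm in B are built this way)
def pvScan (f : Int → Int → Int) : List Int → Int → List Int
  | [], _ => []
  | x :: xs, s => f s x :: pvScan f xs (f s x)

theorem pv_scan_length (f : Int → Int → Int) (l : List Int) (s : Int) :
    (pvScan f l s).length = l.length := by
  induction l generalizing s with
  | nil => rfl
  | cons x xs ih => simp [pvScan, ih]

theorem pv_foldl_pair (f : Int → Int → Int) (l : List Int) (p : List Int) (s : Int) :
    l.foldl (fun ps x => (ps.1 ++ [f ps.2 x], f ps.2 x)) (p, s)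
      = (p ++ pvScan f l s, l.foldl f s) := by
  induction l generalizing p s with
  | nil => simp [pvScan]
  | cons x xs ih => simp [pvScan, ih (p ++ [f s x]) (f s x)]

theorem pv_scan_getElem? (f : Int → Int → Int) :
    ∀ (l : List Int) (s : Int) (j : Nat), j < l.length →
      (pvScan f l s)[j]? = some (List.foldl f s (l.take (j + 1))) := by
  intro l
  induction l with
  | nil => intro s j h; simp at h
  | cons x xs ih =>
    intro s j h
    cases j with
    | zero => simp [pvScan]
    | succ j =>
      simp only [pvScan, List.getElem?_cons_succ, List.take_succ_cons, List.foldl_cons]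
      exact ih (f s x) j (by simpa using h)

-- pre[r+1] is the prefix sum A recomputes with sum(arr[:r+1])
theorem pv_pre_lookup (arr : List Int) (k r : Int) (hk : 0 ≤ k) (hlen : k < (arr.length : Int))
    (hr0 : 0 ≤ r) (hrk : r ≤ k) :
    PySem.List.pyGetD ([0] ++ pvScan (fun s x => s + x) (PySem.List.slice arr none (some (k + 1))) 0) (r + 1) 0
      = (PySem.List.slice arr none (some (r + 1))).sum := by
  rw [PySem.List.slice_to arr (by omega), PySem.List.slice_to arr (by omega)]
  have hsl : (pvScan (fun s x => s + x) (arr.take (k + 1).toNat) 0).length = (k + 1).toNat := by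
    rw [pv_scan_length, List.length_take]; omega
  have hb2 : (r + 1).toNat < ([0] ++ pvScan (fun s x => s + x) (arr.take (k + 1).toNat) 0).length := by
    simp [hsl]; omega
  have h1 : (r + 1).toNat = r.toNat + 1 := by omega
  have e : ([0] ++ pvScan (fun s x => s + x) (arr.take (k + 1).toNat) 0)[(r + 1).toNat]?
      = some ((arr.take ((r + 1).toNat)).sum) := by
    rw [h1, List.getElem?_append_right (by simp)]
    simp only [List.length_cons, List.length_nil, Nat.add_sub_cancel]
    rw [pv_scan_getElem? _ _ _ r.toNat (by rw [List.length_take]; omega)]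
    rw [List.take_take, min_eq_left (by omega)]
    rw [PySem.List.foldl_add _ (fun x : Int => x)]
    simp
  rw [PySem.List.pyGetD_eq_getElem _ _ (by omega) (by simp [hsl]; omega)]
  rw [List.getElem?_eq_getElem hb2] at e
  exact Option.some.inj e

-- pm[r] is the running max A recomputes with the inner pair loop
theorem pv_pm_lookup (arr : List Int) (k r : Int) (hk : 0 ≤ k) (_hlen : k < (arr.length : Int))
    (hr0 : 0 ≤ r) (hrk : r ≤ k) :
    PySem.List.pyGetD ([0] ++ pvScan
        (fun s i => max s (PySem.List.pyGetD arr (i - 1) 0 + PySem.List.pyGetD arr i 0))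
        (PySem.List.pyRange 1 (k + 1) 1) 0) r 0
      = (PySem.List.pyRange 0 r 1).foldl (fun mpv i =>
          max mpv (PySem.List.pyGetD arr i 0 + PySem.List.pyGetD arr (i + 1) 0)) 0 := by
  rcases eq_or_lt_of_le hr0 with hr | hr
  · rw [← hr, PySem.List.pyRange_one_eq_nil (le_refl 0), List.singleton_append,
      PySem.List.pyGetD_zero_cons]
    rfl
  · have hsl : (pvScan (fun s i => max s (PySem.List.pyGetD arr (i - 1) 0 + PySem.List.pyGetD arr i 0))
        (PySem.List.pyRange 1 (k + 1) 1) 0).length = k.toNat := by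
      rw [pv_scan_length, PySem.List.length_pyRange_one]; omega
    have hb2 : r.toNat < ([0] ++ pvScan (fun s i => max s (PySem.List.pyGetD arr (i - 1) 0 + PySem.List.pyGetD arr i 0))
        (PySem.List.pyRange 1 (k + 1) 1) 0).length := by
      simp [hsl]; omega
    have e : ([0] ++ pvScan (fun s i => max s (PySem.List.pyGetD arr (i - 1) 0 + PySem.List.pyGetD arr i 0))
        (PySem.List.pyRange 1 (k + 1) 1) 0)[r.toNat]?
        = some ((PySem.List.pyRange 0 r 1).foldl (fun mpv i =>
            max mpv (PySem.List.pyGetD arr i 0 + PySem.List.pyGetD arr (i + 1) 0)) 0) := by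
      rw [List.getElem?_append_right (by simp; omega)]
      simp only [List.length_cons, List.length_nil]
      rw [pv_scan_getElem? _ _ _ (r.toNat - 1) (by rw [PySem.List.length_pyRange_one]; omega)]
      rw [show r.toNat - 1 + 1 = r.toNat from by omega]
      rw [PySem.List.pyRange_one 1 (k + 1), PySem.List.pyRange_one 0 r]
      rw [← List.map_take, List.take_range, min_eq_left (by omega)]
      rw [List.foldl_map, List.foldl_map]
      simp only [sub_zero]
      rw [PySem.List.foldl_congr_mem _ _
        (fun (x : Int) (y : Nat) => max x (PySem.List.pyGetD arr (0 + (y : Int)) 0 + PySem.List.pyGetD arr (0 + (y : Int) + 1) 0)) _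
        (by intro acc i _
            have e1 : (1 : Int) + (i : Int) - 1 = 0 + (i : Int) := by ring
            have e2 : (1 : Int) + (i : Int) = 0 + (i : Int) + 1 := by ring
            rw [e1, e2])]
    rw [PySem.List.pyGetD_eq_getElem _ _ (by omega) (by simp [hsl]; omega)]
    rw [List.getElem?_eq_getElem hb2] at e
    exact Option.some.inj e

-- the per-test equality
theorem pv_score_eq (k z : Int) (arr : List Int)
    (h : z < 0 ∨ k ≤ 0 ∨ k < (arr.length : Int)) :
    pvScoreA k z arr = pvScoreB k z arr := by
  rcases lt_or_ge z 0 with hz | hz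
  · -- z < 0: A's range is empty, B's guard fails
    unfold pvScoreA pvScoreB
    rw [PySem.List.pyRange_one_eq_nil (by omega), if_neg (fun hc => absurd hc.1 (by omega))]
    rfl
  rcases lt_or_ge k 0 with hk | hk
  · -- k < 0: every iteration of A is skipped, B's guard fails
    unfold pvScoreA pvScoreB
    rw [if_neg (fun hc => absurd hc.2.1 (by omega))]
    exact pv_skipA k 0 (z + 1) 0 arr (fun lm h1 h2 => by omega)
  rcases eq_or_ne arr [] with harr | harr
  · -- arr = []: Pre_ forces k = 0; both sides are 0
    have hk0 : k = 0 := by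
      rcases h with h | h | h
      · omega
      · omega
      · rw [harr] at h; simp at h; omega
    subst harr hk0
    unfold pvScoreA pvScoreB
    rw [if_neg (fun hc => hc.2.2 rfl)]
    rw [PySem.List.pyRange_one_cons (by omega), List.foldl_cons,
      show (0 : Int) + 1 = 1 by norm_num]
    rw [pv_skipA 0 1 (z + 1) _ [] (fun lm h1 h2 => by omega)]
    decide
  · -- main case: 0 ≤ z, 0 ≤ k, k < len arr
    have hlen : k < (arr.length : Int) := by
      rcases h with h | h | h
      · omega
      · have : arr.length ≠ 0 := by simpa using harr
        omega
      · exact h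
    unfold pvScoreA pvScoreB
    rw [if_pos ⟨hz, hk, harr⟩]
    simp only [pv_foldl_pair (fun a b : Int => a + b),
      pv_foldl_pair (fun s i => max s (PySem.List.pyGetD arr (i - 1) 0 + PySem.List.pyGetD arr i 0))]
    rw [PySem.Int.floordiv_eq_ediv_of_pos (by omega)]
    rw [PySem.List.pyRange_one_append 0 (min z (k / 2) + 1) (z + 1) (by omega) (by omega),
      List.foldl_append]
    rw [pv_skipA k (min z (k / 2) + 1) (z + 1) _ arr (fun lm h1 h2 => by omega)]
    apply PySem.List.foldl_congr_mem
    intro acc lm hm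
    have hb := PySem.List.mem_pyRange_one.mp hm
    have hr0 : 0 ≤ k - 2 * lm := by omega
    simp only [if_neg (show ¬(k - 2 * lm < 0) by omega)]
    rw [pv_pre_lookup arr k (k - 2 * lm) hk hlen hr0 (by omega),
      pv_pm_lookup arr k (k - 2 * lm) hk hlen hr0 (by omega)]

-- ===== VERDICT (by name: the statement is the Claim_ definition above) =====
theorem score_high_spec : Claim_equal_score_high := by
  intro m _ hpre
  unfold Spec_score_high score_high score_high_alt
  rw [PySem.List.foldl_append_singleton_eq_map, PySem.List.foldl_append_singleton_eq_map]
  simp only [List.nil_append]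
  exact List.map_congr_left (fun t ht => pv_score_eq _ _ _ (hpre t ht))
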